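-- pv_equiv track=rewrite | github.com/Pockemonchik/dfr_postal_api | first_test_task.py | solution
-- ===== SOURCE A (Python) =====
-- from typing import List
--
-- def solution(nums: List[int]) -> List[List[int]]:
--     res = []
--     res_test = []
--     for i in range(len(nums)):
--         for j in range(i+1, len(nums)):
--             for k in range(j+1, len(nums)):
--                 sum = nums[i]*nums[j]*nums[k]
--                 if sum == 0:
--                     res_test.append([(i,nums[i]), (j,nums[j]), (k,nums[k])])
--                     res.append([nums[i], nums[j], nums[k]])
--     return res
-- ===== SOURCE B (Python) =====
-- from typing import List
--
-- def solution(nums: List[int]) -> List[List[int]]: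
--     # Enumerate only triples i<j<k that contain a zero, by a case split on
--     # which of the first two positions holds a zero; only then is the third
--     # position restricted to the precomputed zero positions.
--     n = len(nums)
--     zeros = [k for k in range(n) if nums[k] == 0]
--     res = []
--     for i in range(n):
--         vi = nums[i]
--         if vi == 0:
--             for j in range(i + 1, n):
--                 vj = nums[j]
--                 res.extend([0, vj, nums[k]] for k in range(j + 1, n))
--         else:
--             for j in range(i + 1, n):
--                 vj = nums[j]
--                 if vj == 0:
--                     res.extend([vi, 0, nums[k]] for k in range(j + 1, n))
--                 else:
--                     res.extend([vi, vj, nums[k]] for k in zeros if k > j)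
--     return res
-- ===== Notes on version B (the rewrite author's own statement) =====
-- stated objective: faster
-- what changed: Instead of testing the product of every index triple, B precomputes the zero positions and case-splits on whether nums[i] or nums[j] is zero, so when both are nonzero the third index is drawn only from the zero-position list rather than scanned over the whole tail.
import Mathlib
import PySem

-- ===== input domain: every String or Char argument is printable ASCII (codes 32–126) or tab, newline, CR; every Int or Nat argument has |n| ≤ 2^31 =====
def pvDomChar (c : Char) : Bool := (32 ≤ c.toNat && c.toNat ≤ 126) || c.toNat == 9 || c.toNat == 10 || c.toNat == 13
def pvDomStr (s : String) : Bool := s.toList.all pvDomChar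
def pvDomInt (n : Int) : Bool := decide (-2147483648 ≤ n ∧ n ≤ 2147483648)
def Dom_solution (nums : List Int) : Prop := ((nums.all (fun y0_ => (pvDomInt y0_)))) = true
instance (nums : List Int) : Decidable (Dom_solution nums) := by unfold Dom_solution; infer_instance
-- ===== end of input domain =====

-- B replaces A's cubic scan over all index triples by a case split on where the
-- first zero among positions i, j sits, restricting the third index to the
-- precomputed zero positions when nums[i] and nums[j] are nonzero (objective: faster).
-- A's local 'res_test' is dead state (never returned) and is omitted from the port.

-- ===== PORT A =====
def solution (nums : List Int) : List (List Int) :=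
  (PySem.List.pyRange 0 (nums.length : Int) 1).foldl (fun res i =>
    (PySem.List.pyRange (i + 1) (nums.length : Int) 1).foldl (fun res j =>
      (PySem.List.pyRange (j + 1) (nums.length : Int) 1).foldl (fun res k =>
        if PySem.List.pyGetD nums i 0 * PySem.List.pyGetD nums j 0 * PySem.List.pyGetD nums k 0 = 0 then
          res ++ [[PySem.List.pyGetD nums i 0, PySem.List.pyGetD nums j 0, PySem.List.pyGetD nums k 0]]
        else res) res) res) []

-- ===== PORT B =====
def solution_alt (nums : List Int) : List (List Int) :=
  let n : Int := (nums.length : Int)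
  let zeros := (PySem.List.pyRange 0 n 1).filter (fun k => PySem.List.pyGetD nums k 0 == 0)
  (PySem.List.pyRange 0 n 1).foldl (fun res i =>
    let vi := PySem.List.pyGetD nums i 0
    if vi = 0 then
      (PySem.List.pyRange (i + 1) n 1).foldl (fun res j =>
        let vj := PySem.List.pyGetD nums j 0
        res ++ (PySem.List.pyRange (j + 1) n 1).map (fun k => [(0 : Int), vj, PySem.List.pyGetD nums k 0])) res
    else
      (PySem.List.pyRange (i + 1) n 1).foldl (fun res j =>
        let vj := PySem.List.pyGetD nums j 0
        if vj = 0 then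
          res ++ (PySem.List.pyRange (j + 1) n 1).map (fun k => [vi, (0 : Int), PySem.List.pyGetD nums k 0])
        else
          res ++ ((zeros.filter (fun k => j < k)).map (fun k => [vi, vj, PySem.List.pyGetD nums k 0]))) res) []

-- ===== PRECONDITION & SPEC =====
def Spec_solution (nums : List Int) (out : List (List Int)) : Prop := out = solution_alt nums
instance (nums : List Int) (out : List (List Int)) : Decidable (Spec_solution nums out) := by unfold Spec_solution; infer_instance

-- ===== CLAIM (what is proved, stated in full; the proofs are below) =====
def Claim_equal_solution : Prop := ∀ (nums : List Int), Dom_solution nums → Spec_solution nums (solution nums)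

-- ===== LEMMAS AND PROOFS =====

-- range(0, n) filtered to elements > j is exactly range(j+1, n)  (for 0 ≤ j)
lemma pyRange_filter_gt (n j : Int) (h : 0 ≤ j) :
    (PySem.List.pyRange 0 n 1).filter (fun k => decide (j < k)) = PySem.List.pyRange (j + 1) n 1 := by
  by_cases hle : n ≤ j + 1
  · rw [PySem.List.pyRange_one_eq_nil hle, List.filter_eq_nil_iff]
    intro k hk
    have := (PySem.List.mem_pyRange_one.mp hk).2
    simp; omega
  · rw [PySem.List.pyRange_one_append 0 (j + 1) n (by omega) (by omega), List.filter_append]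
    have h1 : (PySem.List.pyRange 0 (j + 1) 1).filter (fun k => decide (j < k)) = [] := by
      rw [List.filter_eq_nil_iff]
      intro k hk
      have := (PySem.List.mem_pyRange_one.mp hk).2
      simp; omega
    have h2 : (PySem.List.pyRange (j + 1) n 1).filter (fun k => decide (j < k)) =
        PySem.List.pyRange (j + 1) n 1 := by
      apply List.filter_eq_self.mpr
      intro k hk
      have := (PySem.List.mem_pyRange_one.mp hk).1
      simp; omega
    rw [h1, h2, List.nil_append]

-- per-(i,j) block equality: A's filtered k-scan equals B's three-way case split
lemma inner_block_eq (nums : List Int) (i j : Int) (hj : 0 ≤ j) :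
    ((PySem.List.pyRange (j + 1) (nums.length : Int) 1).filter
        (fun k => decide (PySem.List.pyGetD nums i 0 * PySem.List.pyGetD nums j 0 * PySem.List.pyGetD nums k 0 = 0))).map
      (fun k => [PySem.List.pyGetD nums i 0, PySem.List.pyGetD nums j 0, PySem.List.pyGetD nums k 0]) =
    (if PySem.List.pyGetD nums i 0 = 0 then
      (PySem.List.pyRange (j + 1) (nums.length : Int) 1).map
        (fun k => [(0 : Int), PySem.List.pyGetD nums j 0, PySem.List.pyGetD nums k 0])
    else if PySem.List.pyGetD nums j 0 = 0 then
      (PySem.List.pyRange (j + 1) (nums.length : Int) 1).map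
        (fun k => [PySem.List.pyGetD nums i 0, (0 : Int), PySem.List.pyGetD nums k 0])
    else
      ((((PySem.List.pyRange 0 (nums.length : Int) 1).filter
            (fun k => PySem.List.pyGetD nums k 0 == 0)).filter (fun k => j < k)).map
        (fun k => [PySem.List.pyGetD nums i 0, PySem.List.pyGetD nums j 0, PySem.List.pyGetD nums k 0]))) := by
  by_cases hi : PySem.List.pyGetD nums i 0 = 0
  · rw [if_pos hi, hi]
    congr 1
    apply List.filter_eq_self.mpr
    intro k _
    simp
  · rw [if_neg hi]
    by_cases hjv : PySem.List.pyGetD nums j 0 = 0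
    · rw [if_pos hjv, hjv]
      congr 1
      apply List.filter_eq_self.mpr
      intro k _
      simp
    · rw [if_neg hjv]
      have hcomm : (((PySem.List.pyRange 0 (nums.length : Int) 1).filter
            (fun k => PySem.List.pyGetD nums k 0 == 0)).filter (fun k => decide (j < k))) =
          (PySem.List.pyRange (j + 1) (nums.length : Int) 1).filter
            (fun k => PySem.List.pyGetD nums k 0 == 0) := by
        rw [List.filter_comm, pyRange_filter_gt _ _ hj]
      simp only [hcomm]
      congr 1
      apply List.filter_congr
      intro k _
      have hb : (PySem.List.pyGetD nums k 0 == 0) = decide (PySem.List.pyGetD nums k 0 = 0) :=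
        Bool.beq_eq_decide_eq _ _
      rw [hb]
      simp [mul_eq_zero, hi, hjv]

-- flatten A's triple fold into nested flatMaps
lemma solution_eq_flatMap (nums : List Int) :
    solution nums =
      (PySem.List.pyRange 0 (nums.length : Int) 1).flatMap (fun i =>
        (PySem.List.pyRange (i + 1) (nums.length : Int) 1).flatMap (fun j =>
          ((PySem.List.pyRange (j + 1) (nums.length : Int) 1).filter
              (fun k => decide (PySem.List.pyGetD nums i 0 * PySem.List.pyGetD nums j 0 * PySem.List.pyGetD nums k 0 = 0))).map
            (fun k => [PySem.List.pyGetD nums i 0, PySem.List.pyGetD nums j 0, PySem.List.pyGetD nums k 0]))) := by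
  unfold solution
  rw [PySem.List.foldl_congr_mem _ _ (fun res i =>
      res ++ (PySem.List.pyRange (i + 1) (nums.length : Int) 1).flatMap (fun j =>
        ((PySem.List.pyRange (j + 1) (nums.length : Int) 1).filter
            (fun k => decide (PySem.List.pyGetD nums i 0 * PySem.List.pyGetD nums j 0 * PySem.List.pyGetD nums k 0 = 0))).map
          (fun k => [PySem.List.pyGetD nums i 0, PySem.List.pyGetD nums j 0, PySem.List.pyGetD nums k 0]))) _ ?_,
    PySem.List.foldl_append_eq_flatMap, List.nil_append]
  intro res i _
  rw [PySem.List.foldl_congr_mem _ _ (fun res' j =>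
      res' ++ ((PySem.List.pyRange (j + 1) (nums.length : Int) 1).filter
          (fun k => decide (PySem.List.pyGetD nums i 0 * PySem.List.pyGetD nums j 0 * PySem.List.pyGetD nums k 0 = 0))).map
        (fun k => [PySem.List.pyGetD nums i 0, PySem.List.pyGetD nums j 0, PySem.List.pyGetD nums k 0])) _ ?_,
    PySem.List.foldl_append_eq_flatMap]
  intro res' j _
  exact PySem.List.foldl_append_ite _ _ _ _

-- flatten B's folds into nested flatMaps of the three-way blocks
lemma solution_alt_eq_flatMap (nums : List Int) :
    solution_alt nums =
      (PySem.List.pyRange 0 (nums.length : Int) 1).flatMap (fun i =>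
        (PySem.List.pyRange (i + 1) (nums.length : Int) 1).flatMap (fun j =>
          if PySem.List.pyGetD nums i 0 = 0 then
            (PySem.List.pyRange (j + 1) (nums.length : Int) 1).map
              (fun k => [(0 : Int), PySem.List.pyGetD nums j 0, PySem.List.pyGetD nums k 0])
          else if PySem.List.pyGetD nums j 0 = 0 then
            (PySem.List.pyRange (j + 1) (nums.length : Int) 1).map
              (fun k => [PySem.List.pyGetD nums i 0, (0 : Int), PySem.List.pyGetD nums k 0])
          else
            ((((PySem.List.pyRange 0 (nums.length : Int) 1).filter
                  (fun k => PySem.List.pyGetD nums k 0 == 0)).filter (fun k => j < k)).map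
              (fun k => [PySem.List.pyGetD nums i 0, PySem.List.pyGetD nums j 0, PySem.List.pyGetD nums k 0])))) := by
  unfold solution_alt
  dsimp only
  rw [PySem.List.foldl_congr_mem _ _ (fun res i =>
      res ++ (PySem.List.pyRange (i + 1) (nums.length : Int) 1).flatMap (fun j =>
        if PySem.List.pyGetD nums i 0 = 0 then
          (PySem.List.pyRange (j + 1) (nums.length : Int) 1).map
            (fun k => [(0 : Int), PySem.List.pyGetD nums j 0, PySem.List.pyGetD nums k 0])
        else if PySem.List.pyGetD nums j 0 = 0 then
          (PySem.List.pyRange (j + 1) (nums.length : Int) 1).map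
            (fun k => [PySem.List.pyGetD nums i 0, (0 : Int), PySem.List.pyGetD nums k 0])
        else
          ((((PySem.List.pyRange 0 (nums.length : Int) 1).filter
                (fun k => PySem.List.pyGetD nums k 0 == 0)).filter (fun k => j < k)).map
            (fun k => [PySem.List.pyGetD nums i 0, PySem.List.pyGetD nums j 0, PySem.List.pyGetD nums k 0])))) _ ?_,
    PySem.List.foldl_append_eq_flatMap, List.nil_append]
  intro res i _
  by_cases hi : PySem.List.pyGetD nums i 0 = 0
  · rw [if_pos hi]
    rw [PySem.List.foldl_append_eq_flatMap]
    congr 1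
    apply List.flatMap_congr
    intro j _
    rw [if_pos hi]
  · rw [if_neg hi]
    rw [PySem.List.foldl_congr_mem _ _ (fun res' j =>
        res' ++ (if PySem.List.pyGetD nums j 0 = 0 then
          (PySem.List.pyRange (j + 1) (nums.length : Int) 1).map
            (fun k => [PySem.List.pyGetD nums i 0, (0 : Int), PySem.List.pyGetD nums k 0])
        else
          ((((PySem.List.pyRange 0 (nums.length : Int) 1).filter
                (fun k => PySem.List.pyGetD nums k 0 == 0)).filter (fun k => j < k)).map
            (fun k => [PySem.List.pyGetD nums i 0, PySem.List.pyGetD nums j 0, PySem.List.pyGetD nums k 0])))) _ ?_,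
      PySem.List.foldl_append_eq_flatMap]
    · congr 1
      apply List.flatMap_congr
      intro j _
      rw [if_neg hi]
    · intro res' j _
      dsimp only
      split_ifs <;> rfl

-- ===== VERDICT (by name: the statement is the Claim_ definition above) =====
theorem solution_spec : Claim_equal_solution := by
  intro nums _
  unfold Spec_solution
  rw [solution_eq_flatMap, solution_alt_eq_flatMap]
  apply List.flatMap_congr
  intro i hi
  apply List.flatMap_congr
  intro j hj
  have h0i := (PySem.List.mem_pyRange_one.mp hi).1
  have h0j := (PySem.List.mem_pyRange_one.mp hj).1
  exact inner_block_eq nums i j (by omega)
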